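-- pv_equiv track=rewrite | github.com/noureddineFatimi/mini-Compilator-Quran-AR | analyzer/semantic.py | reconstruct_verses
-- ===== SOURCE A (Python) =====
-- def reconstruct_verses(tokens):
--     input_verses = []
--     current_verse = []
--     for token in tokens:
--         current_verse.append(token)
--         # Si un verset est terminé (basé sur les mots de fin de chaque verset)
--         if token in ['AHADUN', 'ALSSAMADU', 'YOOLADU', 'KUFUWAN']:
--             input_verses.append(' '.join(current_verse))
--             current_verse = []  # Réinitialiser pour le prochain verset
--
--     # Vérification si le dernier verset est juste 'AHADUN' et fusion avec le précédent verset
--     if len(input_verses) > 1: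
--         last_verse = input_verses[-1]
--         second_last_verse = input_verses[-2]
--
--         # Si le dernier verset est 'AHADUN' et que le verset précédent est 'WALAM YAKUN LAHU KUFUWAN', on fusionne
--         if last_verse == 'AHADUN' and second_last_verse == 'WALAM YAKUN LAHU KUFUWAN':
--             merged_verse = f"{second_last_verse} {last_verse}"
--             input_verses[-2] = merged_verse  # Fusionner les deux versets
--             input_verses.pop()  # Supprimer le verset 'AHADUN' maintenant fusionné
--
--     return input_verses
-- ===== SOURCE B (Python) =====
-- _ENDS = ('AHADUN', 'ALSSAMADU', 'YOOLADU', 'KUFUWAN')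
--
--
-- def reconstruct_verses(tokens):
--     # Split by scanning for the next end-word and slicing, instead of an
--     # accumulator loop; tokens after the last end-word are never consumed.
--     verses = []
--     rest = list(tokens)
--     while True:
--         i = next((k for k, t in enumerate(rest) if t in _ENDS), None)
--         if i is None:
--             break
--         verses.append(' '.join(rest[:i + 1]))
--         rest = rest[i + 1:]
--     if verses[-2:] == ['WALAM YAKUN LAHU KUFUWAN', 'AHADUN']:
--         verses = verses[:-2] + ['WALAM YAKUN LAHU KUFUWAN AHADUN']
--     return verses
-- ===== Notes on version B (the rewrite author's own statement) =====
-- stated objective: alternative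
-- what changed: B replaces A's single accumulator loop (append each token, flush on an end-word) by repeatedly locating the next end-word and slicing the verse off the front, and replaces the index/pop merge fix-up by a slice comparison and list rebuild.
import Mathlib
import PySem

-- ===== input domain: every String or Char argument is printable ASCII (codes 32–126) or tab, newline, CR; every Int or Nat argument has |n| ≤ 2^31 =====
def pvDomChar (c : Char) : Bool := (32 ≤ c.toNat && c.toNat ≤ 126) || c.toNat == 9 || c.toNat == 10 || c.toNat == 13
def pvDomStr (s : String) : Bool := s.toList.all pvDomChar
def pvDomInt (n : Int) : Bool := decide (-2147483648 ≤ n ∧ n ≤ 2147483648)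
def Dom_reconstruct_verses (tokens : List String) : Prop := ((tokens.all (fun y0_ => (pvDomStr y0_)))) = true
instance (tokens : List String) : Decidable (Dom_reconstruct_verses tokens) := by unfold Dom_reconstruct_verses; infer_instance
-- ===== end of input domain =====

-- B groups verses by locating the next end-word and slicing them off the front, instead of A's accumulator loop; same return value.

-- ===== PORT A =====
def verseDelims : List String := ["AHADUN", "ALSSAMADU", "YOOLADU", "KUFUWAN"]

-- the loop body of A's for-loop, as a named step function over (input_verses, current_verse)
def stepA (s : List String × List String) (token : String) : List String × List String :=
  let cur := s.2 ++ [token]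
  if verseDelims.contains token then (s.1 ++ [PySem.Str.join " " cur], [])
  else (s.1, cur)

def reconstruct_verses (tokens : List String) : List String :=
  let input_verses := (tokens.foldl stepA ([], [])).1
  if input_verses.length > 1 then
    let last_verse := (PySem.List.pyGet? input_verses (-1)).getD ""
    let second_last := (PySem.List.pyGet? input_verses (-2)).getD ""
    if last_verse = "AHADUN" ∧ second_last = "WALAM YAKUN LAHU KUFUWAN" then
      ((input_verses.set (input_verses.length - 2) (second_last ++ " " ++ last_verse)).dropLast)
    else input_verses
  else input_verses

-- ===== PORT B =====
def verseEnds : List String := ["AHADUN", "ALSSAMADU", "YOOLADU", "KUFUWAN"]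

def splitVerses (rest : List String) : List String :=
  match h : rest.findIdx? (fun t => verseEnds.contains t) with
  | none => []
  | some i => PySem.Str.join " " (rest.take (i + 1)) :: splitVerses (rest.drop (i + 1))
termination_by rest.length
decreasing_by
  obtain ⟨hi, -⟩ := List.findIdx?_eq_some_iff_getElem.mp h
  simp [List.length_drop]; omega

def reconstruct_verses_alt (tokens : List String) : List String :=
  let verses := splitVerses tokens
  if PySem.List.slice verses (some (-2)) none = ["WALAM YAKUN LAHU KUFUWAN", "AHADUN"] then
    PySem.List.slice verses none (some (-2)) ++ ["WALAM YAKUN LAHU KUFUWAN AHADUN"]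
  else verses

-- ===== PRECONDITION & SPEC =====
def Spec_reconstruct_verses (tokens : List String) (out : List String) : Prop := out = reconstruct_verses_alt tokens
instance (tokens : List String) (out : List String) : Decidable (Spec_reconstruct_verses tokens out) := by unfold Spec_reconstruct_verses; infer_instance

-- ===== CLAIM (what is proved, stated in full; the proofs are below) =====
def Claim_equal_reconstruct_verses : Prop := ∀ (tokens : List String), Dom_reconstruct_verses tokens → Spec_reconstruct_verses tokens (reconstruct_verses tokens)

-- ===== LEMMAS AND PROOFS =====

theorem findIdx?_append_delim (pre : List String) (t : String) (ts : List String)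
    (hpre : ∀ x ∈ pre, verseEnds.contains x = false) (ht : verseEnds.contains t = true) :
    (pre ++ t :: ts).findIdx? (fun x => verseEnds.contains x) = some pre.length := by
  induction pre with
  | nil =>
    simp only [List.nil_append, List.findIdx?_cons]
    rw [ht]
    rfl
  | cons p ps ih =>
    have hp := hpre p (by simp)
    simp only [List.cons_append, List.findIdx?_cons, hp]
    rw [ih (fun x hx => hpre x (by simp [hx]))]
    rfl

theorem splitVerses_no_delim (l : List String)
    (hl : ∀ x ∈ l, verseEnds.contains x = false) : splitVerses l = [] := by
  have hnone : l.findIdx? (fun t => verseEnds.contains t) = none :=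
    List.findIdx?_eq_none_iff.mpr (fun x hx => hl x hx)
  rw [splitVerses.eq_def, hnone]

theorem fold_eq_splitVerses (rest : List String) :
    ∀ (vs cur : List String), (∀ t ∈ cur, verseEnds.contains t = false) →
    (rest.foldl stepA (vs, cur)).1 = vs ++ splitVerses (cur ++ rest) := by
  induction rest with
  | nil =>
    intro vs cur hcur
    simp [splitVerses_no_delim cur hcur]
  | cons t ts ih =>
    intro vs cur hcur
    by_cases hd : verseEnds.contains t = true
    · have hstep : stepA (vs, cur) t = (vs ++ [PySem.Str.join " " (cur ++ [t])], []) := by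
        have hd2 : verseDelims.contains t = true := hd
        simp only [stepA]
        rw [if_pos hd2]
      simp only [List.foldl_cons, hstep]
      rw [ih (vs ++ [PySem.Str.join " " (cur ++ [t])]) [] (by simp)]
      have htk : (cur ++ t :: ts).take (cur.length + 1) = cur ++ [t] := by
        rw [show cur ++ t :: ts = (cur ++ [t]) ++ ts by simp,
            show cur.length + 1 = (cur ++ [t]).length by simp]
        exact List.take_left
      have hdr : (cur ++ t :: ts).drop (cur.length + 1) = ts := by
        rw [show cur ++ t :: ts = (cur ++ [t]) ++ ts by simp,
            show cur.length + 1 = (cur ++ [t]).length by simp]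
        exact List.drop_left
      have hsub : splitVerses (cur ++ t :: ts)
          = PySem.Str.join " " (cur ++ [t]) :: splitVerses ts := by
        rw [splitVerses.eq_def, findIdx?_append_delim cur t ts hcur hd]
        simp [htk, hdr]
      rw [hsub]
      simp
    · have hd' : verseEnds.contains t = false := by
        cases hq : verseEnds.contains t with
        | true => exact absurd hq hd
        | false => rfl
      have hstep : stepA (vs, cur) t = (vs, cur ++ [t]) := by
        have hd2 : verseDelims.contains t = false := hd'
        simp only [stepA]
        rw [if_neg (by simpa using hd2)]
      simp only [List.foldl_cons, hstep]
      rw [ih vs (cur ++ [t]) (by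
        intro x hx
        rcases List.mem_append.mp hx with h1 | h1
        · exact hcur x h1
        · simp at h1; subst h1; exact hd')]
      simp

theorem merge_eq (verses : List String) :
    (if verses.length > 1 then
      if (PySem.List.pyGet? verses (-1)).getD "" = "AHADUN" ∧
         (PySem.List.pyGet? verses (-2)).getD "" = "WALAM YAKUN LAHU KUFUWAN" then
        ((verses.set (verses.length - 2)
          ((PySem.List.pyGet? verses (-2)).getD "" ++ " " ++ (PySem.List.pyGet? verses (-1)).getD "")).dropLast)
      else verses
    else verses) =
    (if PySem.List.slice verses (some (-2)) none = ["WALAM YAKUN LAHU KUFUWAN", "AHADUN"] then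
      PySem.List.slice verses none (some (-2)) ++ ["WALAM YAKUN LAHU KUFUWAN AHADUN"]
    else verses) := by
  induction verses using List.reverseRecOn with
  | nil => simp [PySem.List.slice]
  | append_singleton l0 b _ =>
    induction l0 using List.reverseRecOn with
    | nil => simp [PySem.List.slice, PySem.List.clampIdx]
    | append_singleton l a _ =>
      rw [PySem.List.slice_from_neg_ofNat _ 2 (by omega),
          PySem.List.slice_to_neg_ofNat _ 2 (by omega)]
      have hlen : ((l ++ [a]) ++ [b]).length = l.length + 2 := by simp
      have harith : ((l ++ [a]) ++ [b]).length - 2 = l.length := by rw [hlen]; omega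
      have hdrop : ((l ++ [a]) ++ [b]).drop (((l ++ [a]) ++ [b]).length - 2) = [a, b] := by
        rw [harith, List.append_assoc]
        exact List.drop_left
      have htake : ((l ++ [a]) ++ [b]).take (((l ++ [a]) ++ [b]).length - 2) = l := by
        rw [harith, List.append_assoc]
        exact List.take_left
      rw [hdrop, htake]
      have hget1 : (PySem.List.pyGet? ((l ++ [a]) ++ [b]) (-1)).getD "" = b := by
        simp [PySem.List.pyGet?, PySem.List.pyIdx?]
      have hget2 : (PySem.List.pyGet? ((l ++ [a]) ++ [b]) (-2)).getD "" = a := by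
        simp [PySem.List.pyGet?, PySem.List.pyIdx?]
      rw [hget1, hget2]
      by_cases hc : b = "AHADUN" ∧ a = "WALAM YAKUN LAHU KUFUWAN"
      · obtain ⟨hb, ha⟩ := hc
        subst hb; subst ha
        rw [if_pos (by simp), if_pos ⟨rfl, rfl⟩, if_pos rfl]
        rw [harith]
        have hset : ((l ++ ["WALAM YAKUN LAHU KUFUWAN"]) ++ ["AHADUN"]).set l.length
            ("WALAM YAKUN LAHU KUFUWAN" ++ " " ++ "AHADUN")
            = (l ++ ["WALAM YAKUN LAHU KUFUWAN AHADUN"]) ++ ["AHADUN"] := by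
          rw [List.append_assoc, List.set_append_right _ _ (by omega), List.append_assoc]
          simp
        rw [hset]
        simp
      · have hc2 : ¬ ([a, b] = ["WALAM YAKUN LAHU KUFUWAN", "AHADUN"]) := by
          intro h; simp at h; exact hc ⟨h.2, h.1⟩
        rw [if_neg hc2, if_pos (by simp), if_neg hc]

-- ===== VERDICT (by name: the statement is the Claim_ definition above) =====
theorem reconstruct_verses_spec : Claim_equal_reconstruct_verses := by
  intro tokens _
  show reconstruct_verses tokens = reconstruct_verses_alt tokens
  simp only [reconstruct_verses, reconstruct_verses_alt]
  rw [fold_eq_splitVerses tokens [] [] (by simp)]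
  simpa using merge_eq (splitVerses tokens)
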